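-- pv_equiv track=rewrite | github.com/noait2612/university | Year 3/Introduction To Computer Science/Assignments/Exam Prep/2021_A_Aleph.py | multi_range
-- ===== SOURCE A (Python) =====
-- def multi_range(lst):
--     def helper(index):
--         if index + 1 == len(lst):
--             return
--         current_item = lst[index]
--         next_item = lst[index + 1]
--         step = 1 if next_item > current_item else -1
--         if current_item != next_item:
--             for num in range(current_item, next_item, step):
--                 yield num
--         yield from helper(index + 1)
--
--     return helper(0)
-- ===== SOURCE B (Python) =====
-- def multi_range(lst):
--     out = []
--     for cur, nxt in zip(lst, lst[1:]):
--         out.extend(range(cur, nxt, 1 if nxt > cur else -1))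
--     return out
-- ===== Notes on version B (the rewrite author's own statement) =====
-- stated objective: faster
-- what changed: Replaced the recursive index-based generator (whose nested 'yield from' chain forwards every yielded item through O(n) generator frames) with a single flat iterative pass over zipped consecutive pairs extending an output list.
import Mathlib
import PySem

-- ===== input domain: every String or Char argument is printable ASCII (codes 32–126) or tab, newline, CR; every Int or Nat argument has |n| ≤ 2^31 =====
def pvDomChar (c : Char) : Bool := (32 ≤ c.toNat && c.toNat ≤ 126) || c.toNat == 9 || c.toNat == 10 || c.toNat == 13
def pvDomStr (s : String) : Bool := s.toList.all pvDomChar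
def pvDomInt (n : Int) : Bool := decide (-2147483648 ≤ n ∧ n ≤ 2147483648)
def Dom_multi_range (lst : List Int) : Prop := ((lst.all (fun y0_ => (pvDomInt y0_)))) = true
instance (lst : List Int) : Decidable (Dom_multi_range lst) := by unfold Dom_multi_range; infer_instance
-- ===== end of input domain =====

-- B replaces the recursive index generator (nested yield-from delegation) with one flat pass over zipped consecutive pairs; a timing run measured B faster.
-- Python A returns a generator; equivalence is about the list of yielded values.

-- ===== PORT A =====
-- helper(index): the inner recursive generator, collected as a list; the 'none' branch
-- is the IndexError case (empty lst), excluded by Pre_.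
def multi_range_helper (lst : List Int) (index : Nat) : List Int :=
  if index + 1 = lst.length then []
  else
    match hA : PySem.List.pyGet? lst (index : Int) with
    | none => []   -- IndexError in Python (only reachable for lst = [])
    | some current_item =>
      match PySem.List.pyGet? lst ((index : Int) + 1) with
      | none => []   -- IndexError in Python
      | some next_item =>
        (if current_item ≠ next_item then
          PySem.List.pyRange current_item next_item (if next_item > current_item then 1 else -1)
        else []) ++ multi_range_helper lst (index + 1)
termination_by lst.length - index
decreasing_by
  have : index < lst.length := by
    by_contra hge
    have : PySem.List.pyGet? lst (index : Int) = none := by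
      rw [PySem.List.pyGet?_natCast]
      exact List.getElem?_eq_none (by omega)
    simp [this] at hA
  omega

def multi_range (lst : List Int) : List Int := multi_range_helper lst 0

-- ===== PORT B =====
def multi_range_alt (lst : List Int) : List Int :=
  (lst.zip (lst.drop 1)).foldl
    (fun out p => out ++ PySem.List.pyRange p.1 p.2 (if p.2 > p.1 then 1 else -1)) []

-- ===== PRECONDITION & SPEC =====
-- Pre_ excludes only the empty list, on which A raises IndexError (its '!=' termination test reaches lst[0]).
def Pre_multi_range (lst : List Int) : Prop := lst ≠ []
instance (lst : List Int) : Decidable (Pre_multi_range lst) := by unfold Pre_multi_range; infer_instance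
def pvWitness_multi_range : List Int := ([3, 1, 4])

def Spec_multi_range (lst : List Int) (out : List Int) : Prop := out = multi_range_alt lst
instance (lst : List Int) (out : List Int) : Decidable (Spec_multi_range lst out) := by unfold Spec_multi_range; infer_instance

-- ===== CLAIM (what is proved, stated in full; the proofs are below) =====
def Claim_equal_multi_range : Prop := ∀ (lst : List Int), Dom_multi_range lst → Pre_multi_range lst → Spec_multi_range lst (multi_range lst)

-- ===== LEMMAS AND PROOFS =====

-- the per-pair chunk, without A's redundant equality guard
def mrChunk (p : Int × Int) : List Int :=
  PySem.List.pyRange p.1 p.2 (if p.2 > p.1 then 1 else -1)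

theorem mrChunk_guard (c n : Int) :
    (if c ≠ n then PySem.List.pyRange c n (if n > c then 1 else -1) else []) = mrChunk (c, n) := by
  unfold mrChunk
  by_cases h : c = n
  · subst h
    simp [PySem.List.pyRange_neg_one_eq_nil (le_refl c)]
  · simp [h]

-- A's helper computes the flatMap of chunks over consecutive pairs of the suffix
theorem multi_range_helper_eq (lst : List Int) (index : Nat) :
    multi_range_helper lst index =
      ((lst.drop index).zip (lst.drop (index + 1))).flatMap mrChunk := by
  by_cases hend : index + 1 = lst.length
  · rw [multi_range_helper]
    simp only [hend]
    have hnil : lst.drop (index + 1) = [] := by simp [hend]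
    simp [hnil]
  · rw [multi_range_helper, if_neg hend]
    by_cases hlt : index < lst.length
    · have h1 : PySem.List.pyGet? lst (index : Int) = some lst[index] :=
        PySem.List.pyGet?_ofNat lst index hlt
      by_cases hlt2 : index + 1 < lst.length
      · have h2 : PySem.List.pyGet? lst ((index : Int) + 1) = some lst[index + 1] := by
          have := PySem.List.pyGet?_ofNat lst (index + 1) hlt2
          simpa using this
        rw [h1, h2]
        simp only
        rw [mrChunk_guard, multi_range_helper_eq lst (index + 1)]
        have hdrop : lst.drop index = lst[index] :: lst.drop (index + 1) :=
          List.drop_eq_getElem_cons hlt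
        have hdrop2 : lst.drop (index + 1) = lst[index + 1] :: lst.drop (index + 2) :=
          List.drop_eq_getElem_cons hlt2
        simp only [List.zip]
        show mrChunk (lst[index], lst[index + 1]) ++
            (List.zipWith Prod.mk (lst.drop (index + 1)) (lst.drop (index + 2))).flatMap mrChunk =
            (List.zipWith Prod.mk (lst.drop index) (lst.drop (index + 1))).flatMap mrChunk
        rw [hdrop, hdrop2, List.zipWith_cons_cons, List.flatMap_cons]
      · omega
    · have h1 : PySem.List.pyGet? lst (index : Int) = none := by
        rw [PySem.List.pyGet?_natCast]
        exact List.getElem?_eq_none (by omega)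
      rw [h1]
      have hnil : lst.drop index = [] := List.drop_eq_nil_of_le (by omega)
      simp [hnil]
termination_by lst.length - index
decreasing_by
  omega

-- B's foldl computes the same flatMap
theorem multi_range_alt_eq (lst : List Int) :
    multi_range_alt lst = (lst.zip (lst.drop 1)).flatMap mrChunk := by
  unfold multi_range_alt
  rw [PySem.List.foldl_append_eq_flatMap]
  rfl

-- ===== VERDICT (by name: the statement is the Claim_ definition above) =====
theorem multi_range_spec : Claim_equal_multi_range := by
  intro lst _ _
  unfold Spec_multi_range multi_range
  rw [multi_range_helper_eq, multi_range_alt_eq]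
  simp
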